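-- pv_equiv track=rewrite | github.com/primerch/gesp-exam-assessment | data/analysis/level3_deep_analysis.py | identify_knowledge_points
-- ===== SOURCE A (Python) =====
-- REVIEW_LESSONS = {6, 12, 18, 24}
--
-- GESP_KNOWLEDGE_POINTS = {
--     "l5_1": {"name": "初等数论(GCD/LCM/质因数分解)", "keywords": ["素数", "质数", "合数", "GCD", "LCM", "最大公约数", "最小公倍数", "同余", "模运算", "约数", "倍数", "质因数", "质因数分解", "辗转相除", "欧几里得", "互质", "数论", "进制转换", "数制转换", "二进制", "八进制", "十六进制"]},
--     "l5_2": {"name": "高精度运算", "keywords": ["高精度", "大数", "大整数", "高精度加法", "高精度减法", "高精度乘法", "高精度除法", "数组模拟"]},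
--     "l5_3": {"name": "素数筛法", "keywords": ["筛法", "埃氏筛", "埃拉托斯特尼筛", "线性筛", "欧拉筛", "素数表", "质数表", "筛选素数"]},
--     "l5_4": {"name": "链表", "keywords": ["链表", "单链表", "双链表", "双向链表", "循环链表", "链式存储", "节点", "插入", "删除", "遍历", "反转", "next指针", "动态链表"]},
--     "l5_5": {"name": "二分查找/二分答案", "keywords": ["二分查找", "二分答案", "二分枚举", "折半查找", "二分搜索", "lower_bound", "upper_bound", "中间值", "binary search"]},
--     "l5_6": {"name": "贪心算法", "keywords": ["贪心", "贪心算法", "贪心策略", "局部最优", "最优子结构", "活动安排", "区间调度"]},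
--     "l5_7": {"name": "分治算法(归并/快排)", "keywords": ["分治", "分治算法", "分而治之", "归并排序", "merge sort", "快速排序", "快排", "quick sort", "partition", "merge"]},
--     "l5_8": {"name": "递归", "keywords": ["递归", "递归调用", "递归算法", "递归函数", "递归出口", "递归终止", "递归深度", "汉诺塔", "斐波那契", "recursion"]},
--     "l5_9": {"name": "算法复杂度进阶", "keywords": ["时间复杂度", "空间复杂度", "算法复杂度", "复杂度分析", "O(n)", "O(log n)", "O(n²)", "多项式复杂度", "指数复杂度", "大O记号"]},
--     "l6_1": {"name": "树的定义与遍历", "keywords": ["树", "树形结构", "二叉树", "节点", "根节点", "叶子节点", "父节点", "子节点", "树的遍历", "先序遍历", "中序遍历", "后序遍历", "层序遍历", "前序", "中序", "后序", "森林"]},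
--     "l6_2": {"name": "哈夫曼树/完全二叉树/BST", "keywords": ["哈夫曼树", "Huffman树", "最优二叉树", "带权路径长度", "WPL", "完全二叉树", "满二叉树", "二叉排序树", "BST", "二叉搜索树", "平衡二叉树"]},
--     "l6_3": {"name": "哈夫曼编码", "keywords": ["哈夫曼编码", "Huffman编码", "前缀编码", "数据压缩", "最优编码", "编码表"]},
--     "l6_4": {"name": "深度优先搜索(DFS)", "keywords": ["DFS", "深搜", "深度优先", "深度优先搜索", "回溯", "回溯法", "全排列", "组合", "子集", "迷宫搜索", "连通性", "递归搜索"]},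
--     "l6_5": {"name": "广度优先搜索(BFS)", "keywords": ["BFS", "广搜", "广度优先", "广度优先搜索", "层次遍历", "队列搜索", "最短路径", "最少步数"]},
--     "l6_6": {"name": "简单动态规划", "keywords": ["动态规划", "DP", "动态规划算法", "记忆化搜索", "状态转移", "状态转移方程", "最优子结构", "重叠子问题", "递推", "背包问题", "01背包", "完全背包", "子序列", "LCS", "LIS"]},
--     "l6_7": {"name": "栈和队列", "keywords": ["栈", "Stack", "队列", "Queue", "循环队列", "双端队列", "先进先出", "FIFO", "后进先出", "LIFO", "入栈", "出栈", "入队", "出队", "push", "pop"]},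
-- }
--
-- TOPIC_MAPPINGS = {
--     "数制转换": ["l5_1"], "位运算": ["l5_1"], "枚举": ["l5_5", "l5_8"],
--     "递推": ["l6_6"], "二分": ["l5_5"], "贪心": ["l5_6"],
--     "递归": ["l5_8"], "快排": ["l5_7"], "归并": ["l5_7"],
--     "排序": ["l5_7"], "栈": ["l6_7"], "队列": ["l6_7"],
--     "链表": ["l5_4"], "树": ["l6_1", "l6_2"], "二叉树": ["l6_1", "l6_2"],
--     "深搜": ["l6_4"], "DFS": ["l6_4"], "广搜": ["l6_5"],
--     "BFS": ["l6_5"], "动态规划": ["l6_6"], "背包": ["l6_6"],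
--     "哈夫曼": ["l6_2", "l6_3"], "图": ["l6_4", "l6_5"],
-- }
--
-- LESSON_MAPPINGS = {
--     1: ["l5_1"], 2: ["l5_5"], 3: ["l6_6"], 4: ["l5_5"],
--     5: ["l5_6"], 7: ["l5_8"], 8: ["l5_7"], 9: ["l5_7"],
--     10: ["l6_7"], 11: ["l6_7"], 13: ["l5_4"], 14: ["l6_2"],
--     15: ["l6_1", "l6_2"], 16: ["l6_4"], 17: ["l6_5"],
--     19: ["l6_6"], 20: ["l6_6"], 21: ["l6_6"], 22: ["l6_6"],
--     23: ["l6_4", "l6_5"],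
-- }
--
-- def identify_knowledge_points(text, lesson_num):
--     points = set()
--     text_lower = text.lower()
--
--     for point_id, point_info in GESP_KNOWLEDGE_POINTS.items():
--         for keyword in point_info["keywords"]:
--             if keyword.lower() in text_lower or keyword in text:
--                 points.add(point_id)
--                 break
--
--     for topic, point_ids in TOPIC_MAPPINGS.items():
--         if topic in text:
--             for pid in point_ids:
--                 points.add(pid)
--
--     if lesson_num in LESSON_MAPPINGS and lesson_num not in REVIEW_LESSONS:
--         for pid in LESSON_MAPPINGS[lesson_num]:
--             points.add(pid)
--
--     return sorted(list(points))
-- ===== SOURCE B (Python) =====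
-- # One flat rule table: per point id a "|"-joined keyword string, a "|"-joined
-- # topic-trigger string (TOPIC_MAPPINGS inverted) and the lesson numbers that
-- # teach it (LESSON_MAPPINGS inverted; review lessons 6/12/18/24 map nothing, so
-- # no review check is needed).  One ordered pass appends matching ids: no set,
-- # no sort, no dict lookups.
--
-- RULES = [
--     ("l5_1", "素数|质数|合数|GCD|LCM|最大公约数|最小公倍数|同余|模运算|约数|倍数|质因数|质因数分解|辗转相除|欧几里得|互质|数论|进制转换|数制转换|二进制|八进制|十六进制", "数制转换|位运算", [1]),
--     ("l5_2", "高精度|大数|大整数|高精度加法|高精度减法|高精度乘法|高精度除法|数组模拟", "", []),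
--     ("l5_3", "筛法|埃氏筛|埃拉托斯特尼筛|线性筛|欧拉筛|素数表|质数表|筛选素数", "", []),
--     ("l5_4", "链表|单链表|双链表|双向链表|循环链表|链式存储|节点|插入|删除|遍历|反转|next指针|动态链表", "链表", [13]),
--     ("l5_5", "二分查找|二分答案|二分枚举|折半查找|二分搜索|lower_bound|upper_bound|中间值|binary search", "枚举|二分", [2, 4]),
--     ("l5_6", "贪心|贪心算法|贪心策略|局部最优|最优子结构|活动安排|区间调度", "贪心", [5]),
--     ("l5_7", "分治|分治算法|分而治之|归并排序|merge sort|快速排序|快排|quick sort|partition|merge", "快排|归并|排序", [8, 9]),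
--     ("l5_8", "递归|递归调用|递归算法|递归函数|递归出口|递归终止|递归深度|汉诺塔|斐波那契|recursion", "枚举|递归", [7]),
--     ("l5_9", "时间复杂度|空间复杂度|算法复杂度|复杂度分析|O(n)|O(log n)|O(n²)|多项式复杂度|指数复杂度|大O记号", "", []),
--     ("l6_1", "树|树形结构|二叉树|节点|根节点|叶子节点|父节点|子节点|树的遍历|先序遍历|中序遍历|后序遍历|层序遍历|前序|中序|后序|森林", "树|二叉树", [15]),
--     ("l6_2", "哈夫曼树|Huffman树|最优二叉树|带权路径长度|WPL|完全二叉树|满二叉树|二叉排序树|BST|二叉搜索树|平衡二叉树", "树|二叉树|哈夫曼", [14, 15]),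
--     ("l6_3", "哈夫曼编码|Huffman编码|前缀编码|数据压缩|最优编码|编码表", "哈夫曼", []),
--     ("l6_4", "DFS|深搜|深度优先|深度优先搜索|回溯|回溯法|全排列|组合|子集|迷宫搜索|连通性|递归搜索", "深搜|DFS|图", [16, 23]),
--     ("l6_5", "BFS|广搜|广度优先|广度优先搜索|层次遍历|队列搜索|最短路径|最少步数", "广搜|BFS|图", [17, 23]),
--     ("l6_6", "动态规划|DP|动态规划算法|记忆化搜索|状态转移|状态转移方程|最优子结构|重叠子问题|递推|背包问题|01背包|完全背包|子序列|LCS|LIS", "递推|动态规划|背包", [3, 19, 20, 21, 22]),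
--     ("l6_7", "栈|Stack|队列|Queue|循环队列|双端队列|先进先出|FIFO|后进先出|LIFO|入栈|出栈|入队|出队|push|pop", "栈|队列", [10, 11]),
-- ]
--
--
-- def identify_knowledge_points(text, lesson_num):
--     text_lower = text.lower()
--     out = []
--     for pid, kws, topics, lessons in RULES:
--         if (lesson_num in lessons
--                 or any(k.lower() in text_lower or k in text for k in kws.split("|"))
--                 or any(t in text for t in topics.split("|") if t)):
--             out.append(pid)
--     return out
-- ===== Notes on version B (the rewrite author's own statement) =====
-- stated objective: alternative
-- what changed: A accumulates ids into a set via three passes over three tables (keyword dict with break, topic dict, lesson dict guarded by a review set) and then sorts; B makes one ordered pass over a single flat rule table whose per-rule '|'-joined keyword/topic strings are split at match time and whose lesson mapping is inverted into per-rule lesson lists, appending ids in order with no set, no sort and no dict.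
import Mathlib
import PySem

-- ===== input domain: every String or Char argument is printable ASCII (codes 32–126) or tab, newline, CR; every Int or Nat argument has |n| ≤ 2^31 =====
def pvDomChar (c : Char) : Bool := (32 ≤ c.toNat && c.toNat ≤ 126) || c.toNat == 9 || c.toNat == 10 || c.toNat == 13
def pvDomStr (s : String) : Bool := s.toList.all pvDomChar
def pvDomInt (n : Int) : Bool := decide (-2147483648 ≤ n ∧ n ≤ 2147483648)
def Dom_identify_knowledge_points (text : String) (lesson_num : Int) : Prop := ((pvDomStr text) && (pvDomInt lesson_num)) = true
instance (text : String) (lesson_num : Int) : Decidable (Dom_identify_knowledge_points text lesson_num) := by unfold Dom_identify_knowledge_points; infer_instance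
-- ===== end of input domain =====

-- B replaces A's three table passes into a set plus sorted() by ONE ordered pass over a
-- flat rule table ("|"-joined keyword/topic strings split at match time, lesson mapping
-- inverted into per-rule lesson lists): no set, no sort, no dict (objective: alternative).

-- ===== PORT A =====
def pvGesp : List (String × String × List String) := [
  ("l5_1", "初等数论(GCD/LCM/质因数分解)", ["素数", "质数", "合数", "GCD", "LCM", "最大公约数", "最小公倍数", "同余", "模运算", "约数", "倍数", "质因数", "质因数分解", "辗转相除", "欧几里得", "互质", "数论", "进制转换", "数制转换", "二进制", "八进制", "十六进制"]),
  ("l5_2", "高精度运算", ["高精度", "大数", "大整数", "高精度加法", "高精度减法", "高精度乘法", "高精度除法", "数组模拟"]),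
  ("l5_3", "素数筛法", ["筛法", "埃氏筛", "埃拉托斯特尼筛", "线性筛", "欧拉筛", "素数表", "质数表", "筛选素数"]),
  ("l5_4", "链表", ["链表", "单链表", "双链表", "双向链表", "循环链表", "链式存储", "节点", "插入", "删除", "遍历", "反转", "next指针", "动态链表"]),
  ("l5_5", "二分查找/二分答案", ["二分查找", "二分答案", "二分枚举", "折半查找", "二分搜索", "lower_bound", "upper_bound", "中间值", "binary search"]),
  ("l5_6", "贪心算法", ["贪心", "贪心算法", "贪心策略", "局部最优", "最优子结构", "活动安排", "区间调度"]),
  ("l5_7", "分治算法(归并/快排)", ["分治", "分治算法", "分而治之", "归并排序", "merge sort", "快速排序", "快排", "quick sort", "partition", "merge"]),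
  ("l5_8", "递归", ["递归", "递归调用", "递归算法", "递归函数", "递归出口", "递归终止", "递归深度", "汉诺塔", "斐波那契", "recursion"]),
  ("l5_9", "算法复杂度进阶", ["时间复杂度", "空间复杂度", "算法复杂度", "复杂度分析", "O(n)", "O(log n)", "O(n²)", "多项式复杂度", "指数复杂度", "大O记号"]),
  ("l6_1", "树的定义与遍历", ["树", "树形结构", "二叉树", "节点", "根节点", "叶子节点", "父节点", "子节点", "树的遍历", "先序遍历", "中序遍历", "后序遍历", "层序遍历", "前序", "中序", "后序", "森林"]),
  ("l6_2", "哈夫曼树/完全二叉树/BST", ["哈夫曼树", "Huffman树", "最优二叉树", "带权路径长度", "WPL", "完全二叉树", "满二叉树", "二叉排序树", "BST", "二叉搜索树", "平衡二叉树"]),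
  ("l6_3", "哈夫曼编码", ["哈夫曼编码", "Huffman编码", "前缀编码", "数据压缩", "最优编码", "编码表"]),
  ("l6_4", "深度优先搜索(DFS)", ["DFS", "深搜", "深度优先", "深度优先搜索", "回溯", "回溯法", "全排列", "组合", "子集", "迷宫搜索", "连通性", "递归搜索"]),
  ("l6_5", "广度优先搜索(BFS)", ["BFS", "广搜", "广度优先", "广度优先搜索", "层次遍历", "队列搜索", "最短路径", "最少步数"]),
  ("l6_6", "简单动态规划", ["动态规划", "DP", "动态规划算法", "记忆化搜索", "状态转移", "状态转移方程", "最优子结构", "重叠子问题", "递推", "背包问题", "01背包", "完全背包", "子序列", "LCS", "LIS"]),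
  ("l6_7", "栈和队列", ["栈", "Stack", "队列", "Queue", "循环队列", "双端队列", "先进先出", "FIFO", "后进先出", "LIFO", "入栈", "出栈", "入队", "出队", "push", "pop"])]

def pvTopics : List (String × List String) := [
  ("数制转换", ["l5_1"]),
  ("位运算", ["l5_1"]),
  ("枚举", ["l5_5", "l5_8"]),
  ("递推", ["l6_6"]),
  ("二分", ["l5_5"]),
  ("贪心", ["l5_6"]),
  ("递归", ["l5_8"]),
  ("快排", ["l5_7"]),
  ("归并", ["l5_7"]),
  ("排序", ["l5_7"]),
  ("栈", ["l6_7"]),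
  ("队列", ["l6_7"]),
  ("链表", ["l5_4"]),
  ("树", ["l6_1", "l6_2"]),
  ("二叉树", ["l6_1", "l6_2"]),
  ("深搜", ["l6_4"]),
  ("DFS", ["l6_4"]),
  ("广搜", ["l6_5"]),
  ("BFS", ["l6_5"]),
  ("动态规划", ["l6_6"]),
  ("背包", ["l6_6"]),
  ("哈夫曼", ["l6_2", "l6_3"]),
  ("图", ["l6_4", "l6_5"])]

def pvLessons : PySem.Dict Int (List String) := PySem.Dict.mk [
  ((1 : Int), ["l5_1"]),
  ((2 : Int), ["l5_5"]),
  ((3 : Int), ["l6_6"]),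
  ((4 : Int), ["l5_5"]),
  ((5 : Int), ["l5_6"]),
  ((7 : Int), ["l5_8"]),
  ((8 : Int), ["l5_7"]),
  ((9 : Int), ["l5_7"]),
  ((10 : Int), ["l6_7"]),
  ((11 : Int), ["l6_7"]),
  ((13 : Int), ["l5_4"]),
  ((14 : Int), ["l6_2"]),
  ((15 : Int), ["l6_1", "l6_2"]),
  ((16 : Int), ["l6_4"]),
  ((17 : Int), ["l6_5"]),
  ((19 : Int), ["l6_6"]),
  ((20 : Int), ["l6_6"]),
  ((21 : Int), ["l6_6"]),
  ((22 : Int), ["l6_6"]),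
  ((23 : Int), ["l6_4", "l6_5"])]

def pvReview : PySem.Set Int := PySem.Set.ofList [6, 12, 18, 24]

-- inner 'for keyword ...: if ...: points.add(point_id); break' loop
def pvKwLoop (text tl pid : String) (kws : List String) (pts : PySem.Set String) : PySem.Set String :=
  match kws with
  | [] => pts
  | k :: rest =>
      if PySem.Str.isIn (PySem.Str.lower k) tl || PySem.Str.isIn k text then PySem.Set.add pts pid
      else pvKwLoop text tl pid rest pts

def identify_knowledge_points (text : String) (lesson_num : Int) : List String :=
  let tl := PySem.Str.lower text
  let pts1 := pvGesp.foldl (fun pts item => pvKwLoop text tl item.1 item.2.2 pts) PySem.Set.empty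
  let pts2 := pvTopics.foldl
    (fun pts tp => if PySem.Str.isIn tp.1 text then PySem.Set.update pts tp.2 else pts) pts1
  let pts3 := if PySem.Dict.contains pvLessons lesson_num && !(PySem.Set.contains pvReview lesson_num)
    then PySem.Set.update pts2 (PySem.Dict.getD pvLessons lesson_num [])
    else pts2
  PySem.List.sorted pts3 (fun x => x)

-- ===== PORT B =====
-- (pid, "|"-joined keywords, "|"-joined topic triggers, lesson numbers teaching it)
def pvAltRules : List (String × String × String × List Int) := [
  ("l5_1", "素数|质数|合数|GCD|LCM|最大公约数|最小公倍数|同余|模运算|约数|倍数|质因数|质因数分解|辗转相除|欧几里得|互质|数论|进制转换|数制转换|二进制|八进制|十六进制", "数制转换|位运算", [1]),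
  ("l5_2", "高精度|大数|大整数|高精度加法|高精度减法|高精度乘法|高精度除法|数组模拟", "", []),
  ("l5_3", "筛法|埃氏筛|埃拉托斯特尼筛|线性筛|欧拉筛|素数表|质数表|筛选素数", "", []),
  ("l5_4", "链表|单链表|双链表|双向链表|循环链表|链式存储|节点|插入|删除|遍历|反转|next指针|动态链表", "链表", [13]),
  ("l5_5", "二分查找|二分答案|二分枚举|折半查找|二分搜索|lower_bound|upper_bound|中间值|binary search", "枚举|二分", [2, 4]),
  ("l5_6", "贪心|贪心算法|贪心策略|局部最优|最优子结构|活动安排|区间调度", "贪心", [5]),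
  ("l5_7", "分治|分治算法|分而治之|归并排序|merge sort|快速排序|快排|quick sort|partition|merge", "快排|归并|排序", [8, 9]),
  ("l5_8", "递归|递归调用|递归算法|递归函数|递归出口|递归终止|递归深度|汉诺塔|斐波那契|recursion", "枚举|递归", [7]),
  ("l5_9", "时间复杂度|空间复杂度|算法复杂度|复杂度分析|O(n)|O(log n)|O(n²)|多项式复杂度|指数复杂度|大O记号", "", []),
  ("l6_1", "树|树形结构|二叉树|节点|根节点|叶子节点|父节点|子节点|树的遍历|先序遍历|中序遍历|后序遍历|层序遍历|前序|中序|后序|森林", "树|二叉树", [15]),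
  ("l6_2", "哈夫曼树|Huffman树|最优二叉树|带权路径长度|WPL|完全二叉树|满二叉树|二叉排序树|BST|二叉搜索树|平衡二叉树", "树|二叉树|哈夫曼", [14, 15]),
  ("l6_3", "哈夫曼编码|Huffman编码|前缀编码|数据压缩|最优编码|编码表", "哈夫曼", []),
  ("l6_4", "DFS|深搜|深度优先|深度优先搜索|回溯|回溯法|全排列|组合|子集|迷宫搜索|连通性|递归搜索", "深搜|DFS|图", [16, 23]),
  ("l6_5", "BFS|广搜|广度优先|广度优先搜索|层次遍历|队列搜索|最短路径|最少步数", "广搜|BFS|图", [17, 23]),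
  ("l6_6", "动态规划|DP|动态规划算法|记忆化搜索|状态转移|状态转移方程|最优子结构|重叠子问题|递推|背包问题|01背包|完全背包|子序列|LCS|LIS", "递推|动态规划|背包", [3, 19, 20, 21, 22]),
  ("l6_7", "栈|Stack|队列|Queue|循环队列|双端队列|先进先出|FIFO|后进先出|LIFO|入栈|出栈|入队|出队|push|pop", "栈|队列", [10, 11])]

def identify_knowledge_points_alt (text : String) (lesson_num : Int) : List String :=
  let tl := PySem.Str.lower text
  pvAltRules.foldl (fun out r =>
    if r.2.2.2.contains lesson_num
        || ((PySem.Str.split? r.2.1 "|").getD []).any (fun k => PySem.Str.isIn (PySem.Str.lower k) tl || PySem.Str.isIn k text)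
        || (((PySem.Str.split? r.2.2.1 "|").getD []).filter (fun t => t ≠ "")).any (fun t => PySem.Str.isIn t text)
    then out ++ [r.1] else out) []

-- ===== PRECONDITION & SPEC =====
def Spec_identify_knowledge_points (text : String) (lesson_num : Int) (out : List String) : Prop := out = identify_knowledge_points_alt text lesson_num
instance (text : String) (lesson_num : Int) (out : List String) : Decidable (Spec_identify_knowledge_points text lesson_num out) := by unfold Spec_identify_knowledge_points; infer_instance

-- ===== CLAIM (what is proved, stated in full; the proofs are below) =====
def Claim_equal_identify_knowledge_points : Prop := ∀ (text : String) (lesson_num : Int), Dom_identify_knowledge_points text lesson_num → Spec_identify_knowledge_points text lesson_num (identify_knowledge_points text lesson_num)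

-- ===== LEMMAS AND PROOFS =====

-- B's per-rule predicate and B's split-out keyword / topic lists (proof-side names)
def pvKwsOf (r : String × String × String × List Int) : List String := (PySem.Str.split? r.2.1 "|").getD []
def pvTopicsOf (r : String × String × String × List Int) : List String :=
  ((PySem.Str.split? r.2.2.1 "|").getD []).filter (fun t => t ≠ "")

def pvPredB (text : String) (lesson_num : Int) (r : String × String × String × List Int) : Bool :=
  r.2.2.2.contains lesson_num
    || (pvKwsOf r).any (fun k => PySem.Str.isIn (PySem.Str.lower k) (PySem.Str.lower text) || PySem.Str.isIn k text)
    || (pvTopicsOf r).any (fun t => PySem.Str.isIn t text)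

def pvASet (text : String) (lesson_num : Int) : PySem.Set String :=
  let tl := PySem.Str.lower text
  let pts1 := pvGesp.foldl (fun pts item => pvKwLoop text tl item.1 item.2.2 pts) PySem.Set.empty
  let pts2 := pvTopics.foldl
    (fun pts tp => if PySem.Str.isIn tp.1 text then PySem.Set.update pts tp.2 else pts) pts1
  if PySem.Dict.contains pvLessons lesson_num && !(PySem.Set.contains pvReview lesson_num)
    then PySem.Set.update pts2 (PySem.Dict.getD pvLessons lesson_num [])
    else pts2

theorem pvA_eq (text : String) (n : Int) :
    identify_knowledge_points text n = PySem.List.sorted (pvASet text n) (fun x => x) := rfl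

theorem pvKwLoop_eq (text tl pid : String) (kws : List String) (pts : PySem.Set String) :
    pvKwLoop text tl pid kws pts =
      if kws.any (fun k => PySem.Str.isIn (PySem.Str.lower k) tl || PySem.Str.isIn k text)
      then PySem.Set.add pts pid else pts := by
  induction kws with
  | nil => simp [pvKwLoop]
  | cons k rest ih =>
      simp only [pvKwLoop, List.any_cons, Bool.or_eq_true]
      split_ifs with h1 h2 h2 <;> simp_all

theorem mem_gespFold (text tl x : String) (l : List (String × String × List String))
    (pts : PySem.Set String) :
    x ∈ l.foldl (fun pts item => pvKwLoop text tl item.1 item.2.2 pts) pts ↔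
      x ∈ pts ∨ ∃ it ∈ l,
        (it.2.2.any (fun k => PySem.Str.isIn (PySem.Str.lower k) tl || PySem.Str.isIn k text)) = true
          ∧ x = it.1 := by
  induction l generalizing pts with
  | nil => simp
  | cons it rest ih =>
      rw [List.foldl_cons, ih (pvKwLoop text tl it.1 it.2.2 pts), pvKwLoop_eq]
      split_ifs with hc
      · simp only [PySem.Set.mem_add]
        constructor
        · rintro ((h | hx) | ⟨j, hj, hcj, hx⟩)
          exacts [Or.inl h, Or.inr ⟨it, by simp, hc, hx⟩, Or.inr ⟨j, by simp [hj], hcj, hx⟩]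
        · rintro (h | ⟨j, hj, hcj, hx⟩)
          · exact Or.inl (Or.inl h)
          · rcases List.mem_cons.mp hj with rfl | hj
            · exact Or.inl (Or.inr hx)
            · exact Or.inr ⟨j, hj, hcj, hx⟩
      · constructor
        · rintro (h | ⟨j, hj, hcj, hx⟩)
          exacts [Or.inl h, Or.inr ⟨j, by simp [hj], hcj, hx⟩]
        · rintro (h | ⟨j, hj, hcj, hx⟩)
          · exact Or.inl h
          · rcases List.mem_cons.mp hj with rfl | hj
            · exact absurd hcj (by simp_all)
            · exact Or.inr ⟨j, hj, hcj, hx⟩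

theorem mem_topicFold (text x : String) (l : List (String × List String)) (pts : PySem.Set String) :
    x ∈ l.foldl (fun pts tp => if PySem.Str.isIn tp.1 text then PySem.Set.update pts tp.2 else pts) pts ↔
      x ∈ pts ∨ ∃ tp ∈ l, PySem.Str.isIn tp.1 text = true ∧ x ∈ tp.2 := by
  induction l generalizing pts with
  | nil => simp
  | cons tp rest ih =>
      rw [List.foldl_cons, ih]
      split_ifs with hc
      · simp only [PySem.Set.mem_update]
        constructor
        · rintro ((h | hx) | ⟨j, hj, hcj, hx⟩)
          exacts [Or.inl h, Or.inr ⟨tp, by simp, hc, hx⟩, Or.inr ⟨j, by simp [hj], hcj, hx⟩]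
        · rintro (h | ⟨j, hj, hcj, hx⟩)
          · exact Or.inl (Or.inl h)
          · rcases List.mem_cons.mp hj with rfl | hj
            · exact Or.inl (Or.inr hx)
            · exact Or.inr ⟨j, hj, hcj, hx⟩
      · constructor
        · rintro (h | ⟨j, hj, hcj, hx⟩)
          exacts [Or.inl h, Or.inr ⟨j, by simp [hj], hcj, hx⟩]
        · rintro (h | ⟨j, hj, hcj, hx⟩)
          · exact Or.inl h
          · rcases List.mem_cons.mp hj with rfl | hj
            · exact absurd hcj (by simp_all)
            · exact Or.inr ⟨j, hj, hcj, hx⟩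

theorem nodup_gespFold (text tl : String) (l : List (String × String × List String))
    (pts : PySem.Set String) (h : pts.Nodup) :
    (l.foldl (fun pts item => pvKwLoop text tl item.1 item.2.2 pts) pts).Nodup := by
  induction l generalizing pts with
  | nil => exact h
  | cons it rest ih =>
      rw [List.foldl_cons]
      refine ih _ ?_
      rw [pvKwLoop_eq]
      split_ifs
      · exact PySem.Set.nodup_add _ _ h
      · exact h

theorem nodup_topicFold (text : String) (l : List (String × List String))
    (pts : PySem.Set String) (h : pts.Nodup) :
    (l.foldl (fun pts tp => if PySem.Str.isIn tp.1 text then PySem.Set.update pts tp.2 else pts) pts).Nodup := by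
  induction l generalizing pts with
  | nil => exact h
  | cons tp rest ih =>
      rw [List.foldl_cons]
      refine ih _ ?_
      split_ifs
      · exact PySem.Set.nodup_update _ _ h
      · exact h

theorem mem_getD_nil {x : String} {d : PySem.Dict Int (List String)} {k : Int}
    (h : x ∈ PySem.Dict.getD d k []) : ∃ p ∈ d.items, p.1 = k ∧ x ∈ p.2 := by
  unfold PySem.Dict.getD PySem.Dict.get? at h
  cases hf : List.find? (fun p => p.1 == k) d.items with
  | none => rw [hf] at h; simp at h
  | some p =>
      rw [hf] at h
      refine ⟨p, List.mem_of_find?_eq_some hf, ?_, by simpa using h⟩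
      have := List.find?_some hf
      simpa using this

theorem getD_of_not_contains {d : PySem.Dict Int (List String)} {k : Int}
    (h : PySem.Dict.contains d k = false) : PySem.Dict.getD d k [] = [] := by
  unfold PySem.Dict.contains at h
  unfold PySem.Dict.getD PySem.Dict.get?
  rw [List.find?_eq_none.mpr]
  · rfl
  · intro p hp
    simpa using (List.any_eq_false.mp h) p hp

theorem mem_lessonStep (x : String) (d : PySem.Dict Int (List String)) (rev : PySem.Set Int)
    (n : Int) (pts : PySem.Set String) :
    x ∈ (if PySem.Dict.contains d n && !(PySem.Set.contains rev n)
          then PySem.Set.update pts (PySem.Dict.getD d n []) else pts) ↔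
      x ∈ pts ∨ x ∈ (if PySem.Set.contains rev n then [] else PySem.Dict.getD d n []) := by
  by_cases hr : PySem.Set.contains rev n = true
  · rw [if_neg (by simp; intro _; simpa using hr), if_pos hr]
    simp
  · have hr' : PySem.Set.contains rev n = false := Bool.eq_false_iff.mpr hr
    by_cases hc : PySem.Dict.contains d n = true
    · rw [if_pos (by simp [hc]; simpa using hr'), if_neg hr]
      exact PySem.Set.mem_update pts _ x
    · have hc' : PySem.Dict.contains d n = false := Bool.eq_false_iff.mpr hc
      rw [if_neg (by simp [hc']), if_neg hr, getD_of_not_contains hc']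
      simp

-- correspondence facts between A's tables and B's flat rule table (closed, by decide)
set_option maxRecDepth 40000 in
set_option maxHeartbeats 2000000 in
theorem pvFactGesp : ∀ it ∈ pvGesp, ∃ r ∈ pvAltRules, r.1 = it.1 ∧ pvKwsOf r = it.2.2 := by decide
set_option maxRecDepth 40000 in
set_option maxHeartbeats 2000000 in
theorem pvFactGesp' : ∀ r ∈ pvAltRules, ∃ it ∈ pvGesp, it.1 = r.1 ∧ it.2.2 = pvKwsOf r := by decide
theorem pvFactTopic : ∀ tp ∈ pvTopics, ∀ p ∈ tp.2, ∃ r ∈ pvAltRules, r.1 = p ∧ tp.1 ∈ pvTopicsOf r := by decide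
theorem pvFactTopic' : ∀ r ∈ pvAltRules, ∀ t ∈ pvTopicsOf r, ∃ tp ∈ pvTopics, tp.1 = t ∧ r.1 ∈ tp.2 := by decide
theorem pvFactLesson : ∀ p ∈ pvLessons.items, ∀ x ∈ p.2, ∃ r ∈ pvAltRules, r.1 = x ∧ p.1 ∈ r.2.2.2 := by decide
theorem pvFactLesson' : ∀ r ∈ pvAltRules, ∀ n ∈ r.2.2.2,
    r.1 ∈ PySem.Dict.getD pvLessons n [] ∧ PySem.Set.contains pvReview n = false := by decide
theorem pvFactNodup : (pvAltRules.map (fun r => r.1)).Nodup := by decide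
theorem pvFactSorted : (pvAltRules.map (fun r => r.1)).Pairwise (· < ·) := by
  simp only [List.pairwise_map, String.lt_iff_toList_lt]
  decide

theorem pvAlt_eq (text : String) (n : Int) :
    identify_knowledge_points_alt text n = (pvAltRules.filter (pvPredB text n)).map (fun r => r.1) := by
  show pvAltRules.foldl (fun out r => if pvPredB text n r then out ++ [r.1] else out) [] = _
  rw [PySem.List.foldl_append_if (pvPredB text n) (fun r => r.1)]
  rfl

theorem pvMemIff (text : String) (n : Int) (x : String) :
    x ∈ pvASet text n ↔ ∃ r ∈ pvAltRules, pvPredB text n r = true ∧ x = r.1 := by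
  unfold pvASet
  rw [mem_lessonStep, mem_topicFold, mem_gespFold]
  simp only [pvPredB, PySem.Set.empty, List.not_mem_nil, false_or,
    Bool.or_eq_true, List.contains_eq_mem, decide_eq_true_eq]
  constructor
  · rintro ((⟨it, hit, hK, hx⟩ | ⟨tp, htp, hT, hx⟩) | hL)
    · obtain ⟨r, hr, h1, h2⟩ := pvFactGesp it hit
      exact ⟨r, hr, Or.inl (Or.inr (by rw [h2]; exact hK)), by rw [h1]; exact hx⟩
    · obtain ⟨r, hr, h1, h2⟩ := pvFactTopic tp htp x hx
      exact ⟨r, hr, Or.inr (List.any_eq_true.mpr ⟨tp.1, h2, hT⟩), h1.symm⟩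
    · by_cases hrev : PySem.Set.contains pvReview n = true
      · rw [if_pos hrev] at hL; simp at hL
      · rw [if_neg hrev] at hL
        obtain ⟨p, hp, hpk, hxp⟩ := mem_getD_nil hL
        obtain ⟨r, hr, h1, h2⟩ := pvFactLesson p hp x hxp
        exact ⟨r, hr, Or.inl (Or.inl (by rw [← hpk]; exact h2)), h1.symm⟩
  · rintro ⟨r, hr, ((hL | hK) | hT), hx⟩
    · obtain ⟨hmem, hrev⟩ := pvFactLesson' r hr n hL
      refine Or.inr ?_
      rw [if_neg (by simp only [hrev]; exact Bool.false_ne_true), hx]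
      exact hmem
    · obtain ⟨it, hit, h1, h2⟩ := pvFactGesp' r hr
      exact Or.inl (Or.inl ⟨it, hit, by rw [h2]; exact hK, by rw [h1]; exact hx⟩)
    · obtain ⟨t, ht, hTt⟩ := List.any_eq_true.mp hT
      obtain ⟨tp, htp, h1, h2⟩ := pvFactTopic' r hr t ht
      exact Or.inl (Or.inr ⟨tp, htp, by rw [h1]; exact hTt, by rw [hx]; exact h2⟩)

theorem pvNodupA (text : String) (n : Int) : (pvASet text n).Nodup := by
  unfold pvASet
  split_ifs with h
  · exact PySem.Set.nodup_update _ _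
      (nodup_topicFold _ _ _ (nodup_gespFold _ _ _ _ List.nodup_nil))
  · exact nodup_topicFold _ _ _ (nodup_gespFold _ _ _ _ List.nodup_nil)

theorem pvMain (text : String) (n : Int) :
    identify_knowledge_points text n = identify_knowledge_points_alt text n := by
  rw [pvA_eq, pvAlt_eq]
  refine PySem.List.sorted_eq_of_perm_of_pairwise_lt _ _ _ ?_ ?_
  · refine (List.perm_ext_iff_of_nodup ?_ ?_).mpr ?_
    · exact pvFactNodup.sublist (List.filter_sublist.map _)
    · exact pvNodupA text n
    · intro y
      rw [pvMemIff]
      simp only [List.mem_map, List.mem_filter]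
      constructor
      · rintro ⟨r, ⟨hr, hp⟩, hy⟩
        exact ⟨r, hr, hp, hy.symm⟩
      · rintro ⟨r, hr, hp, hy⟩
        exact ⟨r, ⟨hr, hp⟩, hy.symm⟩
  · exact pvFactSorted.sublist (List.filter_sublist.map _)

-- ===== VERDICT (by name: the statement is the Claim_ definition above) =====
theorem identify_knowledge_points_spec : Claim_equal_identify_knowledge_points := by
  intro text n _
  unfold Spec_identify_knowledge_points
  exact pvMain text n
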